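-- pv_equiv track=rewrite | github.com/AlbinSmiley/bezoutPython | base26.py | create_table_from_array
-- ===== SOURCE A (Python) =====
-- def dividByTwo(nombre):
--     resultats = []
--     resultats.append(nombre)
--     while nombre > 1:
--         nombre //= 2
--         resultats.append(nombre)
--     return resultats
--
-- def binary(nombre):
--     return bin(nombre)[2:]
--
-- def bibin(nombre):
--     return [int(digit) for digit in binary(nombre)][::-1]
--
-- def modulo(base, modulo, nombre_de_termes):
--     resultats = [base]
--     for i in range(1, nombre_de_termes):
--         resultats.append((resultats[i - 1] ** 2) % modulo)
--     return resultats
--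
-- def create_table_from_array(n, m, array):
--     divisions = dividByTwo(n)
--     length = len(divisions)
--     binary_representation = bibin(n)
--     mod_results = [modulo(element, m, length) for element in array]
--     mod_results_transposé = [list(i) for i in zip(*mod_results)]
--     mod_results_ts = [str(element) for element in mod_results_transposé]
--     # table = mod_results
--
--
--     head = 'l' * len(array)
--     table = "\\begin{tabular}{lll" + head
--     table +="}\n"
--     table += "\\toprule\n$x$ & $r$ & $n$ & "
--     i = 0
--     while i < len(array) - 1:
--         table += f"${array[i]}"
--         table += "^{2^{n}}"
--         table += f" [{m}]$ & "
--         i += 1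
--     table += f"${array[i]}"
--     table += "^{2^{n}}"
--     moduloS = " ["+ str(m) +"] "
--     # moduloS2 = moduloS + "& "
--     table += moduloS + "$\\\\\n"
--     table += "\\midrule\n"
--
--     mod_ligne = ['$' + '$ & $'.join(map(str, sous_liste)) + '$' for sous_liste in mod_results_transposé]
--
--     # Remplissage du tableau avec les résultats
--     for i in range(len(divisions)):
--         x = divisions[i]
--         reste = binary_representation[i]
--         div_count = i
--         ligne = mod_ligne[i]
--         table += f" {x} & {reste} & {div_count} & {ligne} \\\\\n"
--
--     table += "\\bottomrule\n"
--     table += "\\end{tabular}\n"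
--     return table
-- ===== SOURCE B (Python) =====
-- # B: one-pass row generation with a running halved x and a running squared-mod vector;
-- # no divisions list, no binary-string round trip, no modulo matrix, no transpose.
-- def create_table_from_array(n, m, array):
--     header = ("\\begin{tabular}{lll" + "l" * len(array) + "}\n"
--               + "\\toprule\n$x$ & $r$ & $n$ & "
--               + "".join("$" + str(a) + "^{2^{n}} [" + str(m) + "]$ & " for a in array[:-1])
--               + "$" + str(array[-1]) + "^{2^{n}} [" + str(m) + "] $\\\\\n"
--               + "\\midrule\n")
--     body = ""
--     current = list(array)
--     x = n
--     i = 0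
--     while True:
--         body += (" " + str(x) + " & " + str(x % 2) + " & " + str(i) + " & $"
--                  + "$ & $".join(map(str, current)) + "$ \\\\\n")
--         if x <= 1:
--             break
--         x //= 2
--         i += 1
--         current = [(c * c) % m for c in current]
--     return header + body + "\\bottomrule\n\\end{tabular}\n"
-- ===== Notes on version B (the rewrite author's own statement) =====
-- stated objective: faster
-- what changed: B emits each table row in a single pass that keeps a running halved x (x //= 2) and a running squared-mod vector, builds the header with one ''.join instead of A's quadratic += loop, and drops A's per-element modulo sequences, the zip(*...) matrix transpose and the bin(n)[2:] string round trip for the remainder column.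
import Mathlib
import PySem

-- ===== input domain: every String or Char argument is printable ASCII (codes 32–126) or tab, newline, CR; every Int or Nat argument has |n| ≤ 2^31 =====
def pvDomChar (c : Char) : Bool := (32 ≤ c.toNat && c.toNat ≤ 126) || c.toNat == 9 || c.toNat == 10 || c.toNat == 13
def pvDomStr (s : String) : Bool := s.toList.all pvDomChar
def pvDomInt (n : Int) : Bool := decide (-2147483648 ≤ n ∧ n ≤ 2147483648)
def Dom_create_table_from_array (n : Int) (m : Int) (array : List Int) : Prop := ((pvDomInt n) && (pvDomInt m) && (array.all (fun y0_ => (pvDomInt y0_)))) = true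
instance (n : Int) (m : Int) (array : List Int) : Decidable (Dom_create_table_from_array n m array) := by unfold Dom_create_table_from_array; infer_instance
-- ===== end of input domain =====

-- B replaces A's modulo-matrix + transpose + binary-string round trip by a single row loop with a
-- running halved x and a running squared-mod vector, and joins the header instead of A's += loop
-- (objective: faster, measured).

-- termination helper for the halving recursions (cited by name in decreasing_by)
lemma pv_fdiv2_lt {x : Int} (h : 1 < x) : (PySem.Int.floordiv x 2).toNat < x.toNat := by
  rw [PySem.Int.floordiv_eq_ediv_of_pos (by omega)]; omega

-- ===== PORT A =====
def dividByTwoGo (nombre : Int) (resultats : List Int) : List Int :=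
  if h : 1 < nombre then
    dividByTwoGo (PySem.Int.floordiv nombre 2) (resultats ++ [PySem.Int.floordiv nombre 2])
  else resultats
termination_by nombre.toNat
decreasing_by exact pv_fdiv2_lt h

def dividByTwo (nombre : Int) : List Int := dividByTwoGo nombre [nombre]

-- bin(n)[2:] written by hand (digits most-significant first); exact for n ≥ 0 (Pre_ requires 0 ≤ n;
-- for n < 0 the Python raises ValueError at int('b'))
def binChars (k : Nat) : List Char :=
  if k < 2 then [if k == 1 then '1' else '0']
  else binChars (k / 2) ++ [if k % 2 == 1 then '1' else '0']
termination_by k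
decreasing_by omega

def pyBinary (nombre : Int) : String := String.ofList (binChars nombre.toNat)

-- [int(digit) for digit in binary(nombre)][::-1] ; [::-1] is reverse, int(d) never fails for n ≥ 0
def bibin (nombre : Int) : List Int :=
  ((pyBinary nombre).toList.map (fun d => (PySem.Int.ofStr? (String.ofList [d])).getD 0)).reverse

-- resultats[i-1] is always in range (res has length i at step i), so the pyGetD default is never used
def moduloFn (base : Int) (m : Int) (nombre_de_termes : Int) : List Int :=
  (PySem.List.pyRange 1 nombre_de_termes 1).foldl
    (fun res i => res ++ [PySem.Int.mod ((PySem.List.pyGetD res (i - 1) 0) ^ 2) m]) [base]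

-- zip(*rows) (tuples as lists): structural recursion on the first row, truncating at the shortest
def pyZipList : List Int → List (List Int) → List (List Int)
  | [], _ => []
  | a :: r, rs =>
    if rs.any (·.isEmpty) then []
    else (a :: rs.map (fun l => l.headD 0)) :: pyZipList r (rs.map (·.tail))

def pyZipStar (rows : List (List Int)) : List (List Int) :=
  match rows with
  | [] => []
  | r :: rs => pyZipList r rs

-- the 'while i < len(array) - 1' header loop
def headerGo (array : List Int) (m : Int) (i : Nat) (table : String) : String :=
  if i < array.length - 1 then
    headerGo array m (i + 1)
      (table ++ ("$" ++ PySem.Int.toStr (PySem.List.pyGetD array (i : Int) 0) ++ "^{2^{n}}" ++ " [" ++ PySem.Int.toStr m ++ "]$ & "))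
  else table
termination_by array.length - 1 - i

def create_table_from_array (n : Int) (m : Int) (array : List Int) : String :=
  let divisions := dividByTwo n
  let length := divisions.length
  let binary_representation := bibin n
  let mod_results := array.map (fun element => moduloFn element m (length : Int))
  let mod_results_transposé := pyZipStar mod_results
  -- mod_results_ts is computed but never used by the Python; omitted
  let head := String.ofList (List.replicate array.length 'l')   -- 'l' * len(array)
  let table := "\\begin{tabular}{lll" ++ head
  let table := table ++ "}\n"
  let table := table ++ "\\toprule\n$x$ & $r$ & $n$ & "
  let table := headerGo array m 0 table
  -- after the while loop i = len(array) - 1 (array ≠ [] by Pre_)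
  let table := table ++ ("$" ++ PySem.Int.toStr (PySem.List.pyGetD array ((array.length : Int) - 1) 0))
  let table := table ++ "^{2^{n}}"
  let moduloS := " [" ++ PySem.Int.toStr m ++ "] "
  let table := table ++ (moduloS ++ "$\\\\\n")
  let table := table ++ "\\midrule\n"
  let mod_ligne := mod_results_transposé.map (fun sous_liste => "$" ++ PySem.Str.join "$ & $" (sous_liste.map PySem.Int.toStr) ++ "$")
  let table := (PySem.List.pyRange 0 (length : Int) 1).foldl (fun table i =>
      table ++ (" " ++ PySem.Int.toStr (PySem.List.pyGetD divisions i 0) ++ " & " ++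
        PySem.Int.toStr (PySem.List.pyGetD binary_representation i 0) ++ " & " ++
        PySem.Int.toStr i ++ " & " ++ PySem.List.pyGetD mod_ligne i "" ++ " \\\\\n")) table
  let table := table ++ "\\bottomrule\n"
  table ++ "\\end{tabular}\n"

-- ===== PORT B =====
-- the 'while True' loop of Source B: running halved x, running squared-mod vector
def altRowsGo (m : Int) (x : Int) (i : Int) (cur : List Int) (body : String) : String :=
  let body := body ++ (" " ++ PySem.Int.toStr x ++ " & " ++ PySem.Int.toStr (PySem.Int.mod x 2) ++ " & " ++
    PySem.Int.toStr i ++ " & $" ++ PySem.Str.join "$ & $" (cur.map PySem.Int.toStr) ++ "$ \\\\\n")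
  if h : x ≤ 1 then body
  else altRowsGo m (PySem.Int.floordiv x 2) (i + 1) (cur.map (fun c => PySem.Int.mod (c * c) m)) body
termination_by x.toNat
decreasing_by exact pv_fdiv2_lt (by omega)

def create_table_from_array_alt (n : Int) (m : Int) (array : List Int) : String :=
  let header := "\\begin{tabular}{lll" ++ String.ofList (List.replicate array.length 'l') ++ "}\n" ++
    "\\toprule\n$x$ & $r$ & $n$ & " ++
    PySem.Str.join "" ((PySem.List.slice array none (some (-1))).map (fun a =>
      "$" ++ PySem.Int.toStr a ++ "^{2^{n}} [" ++ PySem.Int.toStr m ++ "]$ & ")) ++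
    "$" ++ PySem.Int.toStr ((PySem.List.pyGet? array (-1)).getD 0) ++ "^{2^{n}} [" ++ PySem.Int.toStr m ++ "] $\\\\\n" ++
    "\\midrule\n"
  let body := altRowsGo m n 0 array ""
  header ++ body ++ "\\bottomrule\n\\end{tabular}\n"

-- ===== PRECONDITION & SPEC =====
-- Pre_ excludes only the inputs where Python A raises: n < 0 (int('b') ValueError from bin()),
-- array = [] (IndexError at array[i]), and m = 0 with n ≥ 2 (ZeroDivisionError in modulo()).
def Pre_create_table_from_array (n : Int) (m : Int) (array : List Int) : Prop :=
  0 ≤ n ∧ array ≠ [] ∧ (2 ≤ n → m ≠ 0)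
instance (n : Int) (m : Int) (array : List Int) : Decidable (Pre_create_table_from_array n m array) := by
  unfold Pre_create_table_from_array; infer_instance

def pvWitness_create_table_from_array : Int × Int × List Int := (6, 5, [2, 3])

def Spec_create_table_from_array (n : Int) (m : Int) (array : List Int) (out : String) : Prop := out = create_table_from_array_alt n m array
instance (n : Int) (m : Int) (array : List Int) (out : String) : Decidable (Spec_create_table_from_array n m array out) := by unfold Spec_create_table_from_array; infer_instance

-- ===== CLAIM (what is proved, stated in full; the proofs are below) =====
def Claim_equal_create_table_from_array : Prop := ∀ (n : Int) (m : Int) (array : List Int), Dom_create_table_from_array n m array → Pre_create_table_from_array n m array → Spec_create_table_from_array n m array (create_table_from_array n m array)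

-- ===== LEMMAS AND PROOFS =====

-- the halving chain below n : [n//2, n//4, …] down to (and including the first value) ≤ 1
def chain (x : Int) : List Int :=
  if h : 1 < x then PySem.Int.floordiv x 2 :: chain (PySem.Int.floordiv x 2) else []
termination_by x.toNat
decreasing_by exact pv_fdiv2_lt h

def sqf (m : Int) : Int → Int := fun c => PySem.Int.mod (c ^ 2) m

def sconcat (l : List String) : String := l.foldr (· ++ ·) ""

def rowOf (m x i : Int) (cur : List Int) : String :=
  " " ++ PySem.Int.toStr x ++ " & " ++ PySem.Int.toStr (PySem.Int.mod x 2) ++ " & " ++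
    PySem.Int.toStr i ++ " & $" ++ PySem.Str.join "$ & $" (cur.map PySem.Int.toStr) ++ "$ \\\\\n"

def rowsFrom (m : Int) : List Int → Int → List Int → String
  | [], _, _ => ""
  | x :: rest, i, cur => rowOf m x i cur ++ rowsFrom m rest (i + 1) (cur.map (sqf m))

def canonTable (n : Int) (m : Int) (array : List Int) : String :=
  "\\begin{tabular}{lll" ++ String.ofList (List.replicate array.length 'l') ++ "}\n" ++
  "\\toprule\n$x$ & $r$ & $n$ & " ++
  sconcat (array.dropLast.map (fun a => "$" ++ PySem.Int.toStr a ++ "^{2^{n}} [" ++ PySem.Int.toStr m ++ "]$ & ")) ++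
  "$" ++ PySem.Int.toStr (array.getLast?.getD 0) ++ "^{2^{n}} [" ++ PySem.Int.toStr m ++ "] $\\\\\n" ++
  "\\midrule\n" ++
  rowsFrom m (n :: chain n) 0 array ++
  "\\bottomrule\n" ++ "\\end{tabular}\n"

lemma chain_nonpos {x : Int} (h : ¬ 1 < x) : chain x = [] := by rw [chain]; simp [h]

lemma chain_gt {x : Int} (h : 1 < x) :
    chain x = PySem.Int.floordiv x 2 :: chain (PySem.Int.floordiv x 2) := by rw [chain]; simp [h]

lemma str_append_empty (s : String) : s ++ "" = s := by
  apply String.toList_inj.mp; simp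

lemma join_empty_cons (a : String) (l : List String) :
    PySem.Str.join "" (a :: l) = a ++ PySem.Str.join "" l := by
  apply String.toList_inj.mp
  cases l with
  | nil => simp [PySem.Str.toList_join, PySem.Chars.join_singleton, PySem.Chars.join_nil]
  | cons b t => simp [PySem.Str.toList_join, PySem.Chars.join_cons_cons]

lemma join_empty_eq_sconcat (l : List String) : PySem.Str.join "" l = sconcat l := by
  induction l with
  | nil => apply String.toList_inj.mp; simp [sconcat, PySem.Str.toList_join, PySem.Chars.join_nil]
  | cons a t ih => rw [join_empty_cons, ih]; rfl

lemma go_eq : ∀ (k : Nat) (x : Int), x.toNat ≤ k → ∀ res, dividByTwoGo x res = res ++ chain x := by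
  intro k
  induction k with
  | zero =>
    intro x hx res
    have h : ¬ 1 < x := by omega
    rw [dividByTwoGo, chain]; simp [h]
  | succ k ih =>
    intro x hx res
    by_cases h : 1 < x
    · rw [dividByTwoGo, chain_gt h]
      rw [dif_pos h, ih _ (by have := pv_fdiv2_lt h; omega)]
      simp
    · rw [dividByTwoGo, chain]; simp [h]

lemma dividByTwo_eq (n : Int) : dividByTwo n = n :: chain n := by
  unfold dividByTwo
  rw [go_eq n.toNat n le_rfl]; rfl

lemma bib_eq : ∀ (fuel k : Nat), k ≤ fuel →
    ((binChars k).map (fun d => (PySem.Int.ofStr? (String.ofList [d])).getD 0)).reverse =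
      (((k : Int)) :: chain (k : Int)).map (fun x => PySem.Int.mod x 2) := by
  intro fuel
  induction fuel with
  | zero =>
    intro k hk; interval_cases k
    rw [binChars, chain]; norm_num; decide
  | succ fuel ih =>
    intro k hk
    by_cases h2 : k < 2
    · interval_cases k
      · rw [binChars, chain]; norm_num; decide
      · rw [binChars, chain]; norm_num; decide
    · rw [binChars, if_neg h2]
      have hc : chain (k : Int) = PySem.Int.floordiv (k : Int) 2 :: chain (PySem.Int.floordiv (k : Int) 2) :=
        chain_gt (by exact_mod_cast by omega : (1 : Int) < (k : Int))
      have hfd : PySem.Int.floordiv (k : Int) 2 = ((k / 2 : Nat) : Int) := by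
        rw [PySem.Int.floordiv_eq_ediv_of_pos (by omega)]; omega
      have hmod : PySem.Int.mod (k : Int) 2 = ((k % 2 : Nat) : Int) := by
        rw [PySem.Int.mod_eq_emod_of_pos (by omega)]; omega
      rw [List.map_append, List.reverse_append]
      rw [ih (k / 2) (by omega)]
      rw [hc, hfd]
      simp [hmod, hfd]
      have hcast : ((k : Int)) % 2 = ((k % 2 : Nat) : Int) := by omega
      have h01 : k % 2 = 0 ∨ k % 2 = 1 := by omega
      rcases h01 with h | h <;> rw [hcast, h] <;> decide

lemma bibin_eq {n : Int} (hn : 0 ≤ n) :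
    bibin n = (n :: chain n).map (fun x => PySem.Int.mod x 2) := by
  unfold bibin pyBinary
  rw [String.toList_ofList]
  have := bib_eq n.toNat n.toNat le_rfl
  rw [Int.toNat_of_nonneg hn] at this
  exact this

lemma modFold (m e : Int) : ∀ (fuel a b : Nat), b - a = fuel → 1 ≤ a →
    (PySem.List.pyRange (a : Int) (b : Int) 1).foldl
      (fun res i => res ++ [PySem.Int.mod ((PySem.List.pyGetD res (i - 1) 0) ^ 2) m])
      ((List.range a).map (fun j => (sqf m)^[j] e)) =
    (List.range (max a b)).map (fun j => (sqf m)^[j] e) := by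
  intro fuel
  induction fuel with
  | zero =>
    intro a b hf ha
    have hba : b ≤ a := by omega
    rw [PySem.List.pyRange_one_eq_nil (by exact_mod_cast hba)]
    simp [Nat.max_eq_left hba]
  | succ fuel ih =>
    intro a b hf ha
    have hab : a < b := by omega
    rw [PySem.List.pyRange_one_cons (by exact_mod_cast hab)]
    rw [List.foldl_cons]
    have hidx : ((a : Int) - 1) = ((a - 1 : Nat) : Int) := by omega
    have hget : PySem.List.pyGetD ((List.range a).map (fun j => (sqf m)^[j] e)) ((a : Int) - 1) 0 = (sqf m)^[a - 1] e := by
      rw [hidx, PySem.List.pyGetD_natCast, PySem.List.getD_map_range _ _ _ _ (by omega)]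
    rw [hget]
    have hstep : (List.range a).map (fun j => (sqf m)^[j] e) ++ [PySem.Int.mod (((sqf m)^[a - 1] e) ^ 2) m] =
        (List.range (a + 1)).map (fun j => (sqf m)^[j] e) := by
      rw [List.range_succ, List.map_append]
      congr 1
      have : a - 1 + 1 = a := by omega
      simp only [List.map_cons, List.map_nil]
      rw [← this, Function.iterate_succ_apply']
      rfl
    rw [hstep]
    have hcast : ((a : Int)) + 1 = ((a + 1 : Nat) : Int) := by omega
    rw [hcast, ih (a + 1) b (by omega) (by omega)]
    have hmax : max (a + 1) b = max a b := by omega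
    rw [hmax]

lemma moduloFn_eq (m e : Int) (N : Nat) (h : 1 ≤ N) :
    moduloFn e m (N : Int) = (List.range N).map (fun j => (sqf m)^[j] e) := by
  unfold moduloFn
  have h1 : [e] = (List.range 1).map (fun j => (sqf m)^[j] e) := by simp
  rw [h1]
  have := modFold m e (N - 1) 1 N (by omega) le_rfl
  rw [Nat.cast_one] at this
  rw [this, Nat.max_eq_right h]

lemma zipL : ∀ (L : Nat) (g : Int → Nat → Int) (a : Int) (rest : List Int),
    pyZipList ((List.range L).map (g a)) (rest.map (fun e => (List.range L).map (g e))) =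
      (List.range L).map (fun j => (a :: rest).map (fun e => g e j)) := by
  intro L
  induction L with
  | zero => intro g a rest; simp [pyZipList]
  | succ L ih =>
    intro g a rest
    rw [List.range_succ_eq_map]
    simp only [List.map_cons, List.map_map]
    rw [pyZipList]
    have hany : ((rest.map (fun e => g e 0 :: List.map ((fun j => g e j) ∘ Nat.succ) (List.range L))).any (·.isEmpty)) = false := by
      simp [List.any_map, Function.comp]
    rw [if_neg (by simp [hany])]
    congr 1
    · simp [Function.comp]
    · have := ih (fun e j => g e (j + 1)) a rest
      simp only [List.map_map, Function.comp] at *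
      convert this using 2 <;> simp [List.map_map, Function.comp]

lemma headerGo_eq (array : List Int) (m : Int) : ∀ (fuel i : Nat), array.length - 1 - i = fuel → ∀ t,
    headerGo array m i t = t ++ sconcat ((array.dropLast.drop i).map (fun a =>
      "$" ++ PySem.Int.toStr a ++ "^{2^{n}}" ++ " [" ++ PySem.Int.toStr m ++ "]$ & ")) := by
  intro fuel
  induction fuel with
  | zero =>
    intro i hf t
    have h : ¬ i < array.length - 1 := by omega
    rw [headerGo, if_neg h]
    rw [List.drop_of_length_le (by simp [List.length_dropLast]; omega)]
    simp [sconcat, str_append_empty]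
  | succ fuel ih =>
    intro i hf t
    by_cases h : i < array.length - 1
    · rw [headerGo, if_pos h, ih (i + 1) (by omega)]
      have hi : i < array.length := by omega
      have hgd : PySem.List.pyGetD array (i : Int) 0 = array[i] := by
        rw [PySem.List.pyGetD_natCast, List.getD_eq_getElem array 0 hi]
      have hdrop : array.dropLast.drop i = array[i] :: array.dropLast.drop (i + 1) := by
        rw [List.drop_eq_getElem_cons (by simp [List.length_dropLast]; omega)]
        congr 1
        exact List.getElem_dropLast _
      rw [hdrop, List.map_cons]
      show _ = t ++ sconcat (_ :: _)
      rw [hgd]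
      show _ = t ++ (_ ++ sconcat _)
      rw [String.append_assoc]
    · rw [headerGo, if_neg h]
      rw [List.drop_of_length_le (by simp [List.length_dropLast]; omega)]
      simp [sconcat, str_append_empty]

lemma foldString (h : Int → String) : ∀ (l : List Int) (t0 : String),
    l.foldl (fun t i => t ++ h i) t0 = t0 ++ sconcat (l.map h) := by
  intro l
  induction l with
  | nil => intro t0; simp [sconcat, str_append_empty]
  | cons a t ih =>
    intro t0
    show t.foldl _ (t0 ++ h a) = _
    rw [ih, String.append_assoc]; rfl

lemma rowsR (m : Int) : ∀ (ds : List Int) (i0 : Int) (cur : List Int),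
    sconcat ((List.range ds.length).map (fun k =>
      rowOf m (ds.getD k 0) (i0 + (k : Int)) (cur.map ((sqf m)^[k])))) = rowsFrom m ds i0 cur := by
  intro ds
  induction ds with
  | nil => intro i0 cur; simp [sconcat, rowsFrom]
  | cons d rest ih =>
    intro i0 cur
    rw [rowsFrom]
    rw [List.length_cons, List.range_succ_eq_map, List.map_cons, List.map_map]
    show rowOf m d (i0 + (0 : Nat)) (cur.map ((sqf m)^[0])) ++ sconcat _ = _
    have h0 : rowOf m d (i0 + ((0 : Nat) : Int)) (cur.map ((sqf m)^[0])) = rowOf m d i0 cur := by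
      simp
    rw [h0]
    congr 1
    rw [← ih (i0 + 1) (cur.map (sqf m))]
    congr 1
    apply List.map_congr_left
    intro k _
    simp only [Function.comp, List.getD_cons_succ]
    rw [show i0 + ((Nat.succ k : Nat) : Int) = i0 + 1 + (k : Int) by push_cast; ring]
    rw [Function.iterate_succ, ← List.map_map]

lemma altRowsGo_eq (m : Int) : ∀ (fuel : Nat) (x : Int), x.toNat ≤ fuel → ∀ (i : Int) (cur : List Int) (body : String),
    altRowsGo m x i cur body = body ++ rowsFrom m (x :: chain x) i cur := by
  intro fuel
  induction fuel with
  | zero =>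
    intro x hx i cur body
    have h : x ≤ 1 := by omega
    rw [altRowsGo]
    simp only [dif_pos h]
    rw [rowsFrom, chain_nonpos (by omega), rowsFrom]
    simp [rowOf, String.append_assoc]
  | succ fuel ih =>
    intro x hx i cur body
    by_cases h : x ≤ 1
    · rw [altRowsGo]
      simp only [dif_pos h]
      rw [rowsFrom, chain_nonpos (by omega), rowsFrom]
      simp [rowOf, String.append_assoc]
    · rw [altRowsGo]
      simp only [dif_neg h]
      have hlt : (PySem.Int.floordiv x 2).toNat < x.toNat := pv_fdiv2_lt (by omega)
      rw [ih (PySem.Int.floordiv x 2) (by omega)]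
      have hsq : (fun c => PySem.Int.mod (c * c) m) = sqf m := by
        funext c; simp [sqf, pow_two]
      rw [chain_gt (show (1:Int) < x by omega), hsq]
      simp [rowsFrom, rowOf, String.append_assoc]

lemma B_canon {array : List Int} (_hne : array ≠ []) (n m : Int) :
    create_table_from_array_alt n m array = canonTable n m array := by
  unfold create_table_from_array_alt canonTable
  rw [altRowsGo_eq m n.toNat n le_rfl 0 array ""]
  rw [PySem.List.slice_to_neg_one, join_empty_eq_sconcat, PySem.List.pyGet?_neg_one]
  rw [show ("\\bottomrule\n\\end{tabular}\n" : String) = "\\bottomrule\n" ++ "\\end{tabular}\n" from by decide]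
  simp [String.append_assoc]

lemma transpose_eq (m : Int) (L : Nat) (a : Int) (rest : List Int) :
    pyZipStar ((a :: rest).map (fun e => (List.range L).map (fun j => (sqf m)^[j] e))) =
      (List.range L).map (fun j => (a :: rest).map (fun e => (sqf m)^[j] e)) := by
  rw [List.map_cons]
  show pyZipList _ _ = _
  exact zipL L (fun e j => (sqf m)^[j] e) a rest

lemma A_canon {n : Int} {array : List Int} (hn : 0 ≤ n) (hne : array ≠ []) (m : Int) :
    create_table_from_array n m array = canonTable n m array := by
  obtain ⟨a, rest, rfl⟩ : ∃ a rest, array = a :: rest := by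
    cases array with
    | nil => exact absurd rfl hne
    | cons a rest => exact ⟨a, rest, rfl⟩
  unfold create_table_from_array
  dsimp only
  rw [dividByTwo_eq n, bibin_eq hn]
  have hL1 : 1 ≤ (n :: chain n).length := by simp
  rw [List.map_congr_left (fun e _ => moduloFn_eq m e (n :: chain n).length hL1)]
  rw [transpose_eq m (n :: chain n).length a rest]
  have hlast : PySem.List.pyGetD (a :: rest) ((((a :: rest).length : Nat) : Int) - 1) 0 = (a :: rest).getLast?.getD 0 := by
    rw [show (((a :: rest).length : Nat) : Int) - 1 = ((((a :: rest).length - 1 : Nat)) : Int) from by push_cast [List.length_cons]; omega]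
    rw [PySem.List.pyGetD_natCast, List.getD_eq_getElem?_getD, List.getLast?_eq_getElem?]
  rw [headerGo_eq (a :: rest) m ((a :: rest).length - 1 - 0) 0 rfl]
  rw [List.drop_zero]
  rw [foldString]
  rw [PySem.List.pyRange_zero_nat, List.map_map, List.map_map]
  unfold canonTable
  rw [← rowsR m (n :: chain n) 0 (a :: rest)]
  have hrowmap : List.map ((fun i => " " ++ PySem.Int.toStr (PySem.List.pyGetD (n :: chain n) i 0) ++ " & " ++ PySem.Int.toStr (PySem.List.pyGetD (List.map (fun x => PySem.Int.mod x 2) (n :: chain n)) i 0) ++ " & " ++ PySem.Int.toStr i ++ " & " ++ PySem.List.pyGetD (List.map ((fun sous_liste => "$" ++ PySem.Str.join "$ & $" (List.map PySem.Int.toStr sous_liste) ++ "$") ∘ fun j => List.map (fun e => (sqf m)^[j] e) (a :: rest)) (List.range (n :: chain n).length)) i "" ++ " \\\\\n") ∘ fun k => ((k : Nat) : Int)) (List.range (n :: chain n).length) = List.map (fun k => rowOf m ((n :: chain n).getD k 0) (0 + ((k : Nat) : Int)) (List.map (sqf m)^[k] (a :: rest))) (List.range (n :: chain n).length) := by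
    apply List.map_congr_left
    intro k hk
    have hkL : k < (n :: chain n).length := List.mem_range.mp hk
    simp only [Function.comp_apply]
    rw [PySem.List.pyGetD_natCast, PySem.List.pyGetD_natCast, PySem.List.pyGetD_natCast]
    rw [PySem.List.getD_map_range _ _ _ _ hkL]
    rw [rowOf]
    rw [List.getD_eq_getElem _ _ (show k < (List.map (fun x => PySem.Int.mod x 2) (n :: chain n)).length by simpa using hkL), List.getElem_map]
    rw [List.getD_eq_getElem _ _ hkL]
    simp [String.append_assoc]
    rw [show (" & $" : String) = " & " ++ "$" from by decide, String.append_assoc]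
  rw [hrowmap]
  rw [hlast]
  rw [show ("^{2^{n}} [" : String) = "^{2^{n}}" ++ " [" from by decide]
  rw [show ("] $\\\\\n" : String) = "] " ++ "$\\\\\n" from by decide]
  simp [String.append_assoc]
  rw [show ("^{2^{n}} [" : String) = "^{2^{n}}" ++ " [" from by decide, String.append_assoc]

-- ===== VERDICT (by name: the statement is the Claim_ definition above) =====
theorem create_table_from_array_spec : Claim_equal_create_table_from_array := by
  intro n m array _ hpre
  obtain ⟨hn, hne, -⟩ := hpre
  unfold Spec_create_table_from_array
  rw [A_canon hn hne m, B_canon hne n m]
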